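-- pv_equiv track=rewrite | github.com/vchen3/cs111-final-project | Functions.py | storage
-- ===== SOURCE A (Python) =====
-- def storage(listofanswers,masterlist):  #takes stored answers and masterlist and creates dictionary with keys = professor names, and values = count
--     testdict = {}
--     for answer in listofanswers: #considers each stored value
--         for dictionary in masterlist: #considers each question number
--             printer = dictionary.values() #List with one subdictionary in it
--             for item in printer: #item is a dictionary
--                 if answer in item: #if the stored value is in that subdictionary
--                     profname= item[answer]
--                     if profname not in testdict: #add professor to dictionary of stored answers
--                         testdict[profname] = 1
--                     else:
--                         testdict[profname]+=1 #increase count of professor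
--     return testdict
-- ===== SOURCE B (Python) =====
-- def storage(listofanswers, masterlist):
--     index = {}
--     for dictionary in masterlist:
--         for item in dictionary.values():
--             for ans, prof in item.items():
--                 index.setdefault(ans, []).append(prof)
--     testdict = {}
--     for answer in listofanswers:
--         for prof in index.get(answer, ()):
--             testdict[prof] = testdict.get(prof, 0) + 1
--     return testdict
-- ===== Notes on version B (the rewrite author's own statement) =====
-- stated objective: faster
-- what changed: B builds an answer-to-professors index from masterlist in one pass and then answers each stored answer by a single dictionary lookup, instead of A's rescan of the whole masterlist for every answer.
import Mathlib
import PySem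

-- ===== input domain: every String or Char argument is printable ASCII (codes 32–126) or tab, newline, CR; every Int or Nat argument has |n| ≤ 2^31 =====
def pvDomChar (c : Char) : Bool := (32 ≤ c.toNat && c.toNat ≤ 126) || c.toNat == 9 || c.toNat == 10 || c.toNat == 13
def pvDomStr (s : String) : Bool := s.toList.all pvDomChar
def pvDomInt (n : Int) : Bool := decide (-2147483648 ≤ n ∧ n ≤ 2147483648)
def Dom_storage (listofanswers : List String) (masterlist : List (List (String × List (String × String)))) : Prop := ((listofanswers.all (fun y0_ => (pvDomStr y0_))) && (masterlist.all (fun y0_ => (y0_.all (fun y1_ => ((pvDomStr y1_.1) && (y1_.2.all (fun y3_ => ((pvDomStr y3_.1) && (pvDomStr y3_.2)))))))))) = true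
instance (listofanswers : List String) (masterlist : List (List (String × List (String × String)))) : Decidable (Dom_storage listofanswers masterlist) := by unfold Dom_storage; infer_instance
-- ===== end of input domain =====

-- B builds an answer→professors index over masterlist once, replacing A's rescan of masterlist per stored answer (asymptotically faster in a timing run).

-- ===== PORT A =====
-- A: for each answer, scan every question-dict of masterlist, and for each inner dict
-- holding it, count its professor; counts kept in an insertion-ordered dict.
def storage (listofanswers : List String) (masterlist : List (List (String × List (String × String)))) : List (String × Int) :=
  (listofanswers.foldl (fun testdict answer =>
    masterlist.foldl (fun testdict dictionary =>
      let printer := (PySem.Dict.mk dictionary).values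
      printer.foldl (fun testdict item =>
        let itemd := PySem.Dict.mk item
        if itemd.contains answer then
          let profname := itemd.getD answer ""
          if testdict.contains profname = false then
            testdict.insert profname 1
          else
            testdict.insert profname (testdict.getD profname 0 + 1)
        else testdict) testdict) testdict) (PySem.Dict.empty : PySem.Dict String Int)).items

-- ===== PORT B =====
-- B: one pass over masterlist builds index : answer → list of professors; then one pass
-- over the answers increments the counter of each professor the index yields.
def storage_alt (listofanswers : List String) (masterlist : List (List (String × List (String × String)))) : List (String × Int) :=
  let index : PySem.Dict String (List String) :=
    masterlist.foldl (fun index dictionary =>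
      ((PySem.Dict.mk dictionary).values).foldl (fun index item =>
        ((PySem.Dict.mk item).items).foldl (fun index pr =>
          index.modify pr.1 [] (· ++ [pr.2])) index) index) PySem.Dict.empty
  let testdict : PySem.Dict String Int :=
    listofanswers.foldl (fun testdict answer =>
      (index.getD answer []).foldl (fun testdict prof =>
        testdict.insert prof (testdict.getD prof 0 + 1)) testdict) PySem.Dict.empty
  testdict.items

-- ===== PRECONDITION & SPEC =====
-- Pre_ requires the inner answer→professor association lists to have distinct keys: they
-- encode Python dicts, which cannot repeat a key, so this excludes no Python input.
def Pre_storage (listofanswers : List String) (masterlist : List (List (String × List (String × String)))) : Prop :=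
  ∀ d ∈ masterlist, ∀ p ∈ d, (p.2.map Prod.fst).Nodup
instance (listofanswers : List String) (masterlist : List (List (String × List (String × String)))) : Decidable (Pre_storage listofanswers masterlist) := by unfold Pre_storage; infer_instance
def pvWitness_storage : List String × (List (List (String × List (String × String)))) :=
  (["a", "b", "a"], [[("q1", [("a", "ProfX"), ("b", "ProfY")])], [("q2", [("a", "ProfX")])]])

def Spec_storage (listofanswers : List String) (masterlist : List (List (String × List (String × String)))) (out : List (String × Int)) : Prop := out = storage_alt listofanswers masterlist
instance (listofanswers : List String) (masterlist : List (List (String × List (String × String)))) (out : List (String × Int)) : Decidable (Spec_storage listofanswers masterlist out) := by unfold Spec_storage; infer_instance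

-- ===== CLAIM (what is proved, stated in full; the proofs are below) =====
def Claim_equal_storage : Prop := ∀ (listofanswers : List String) (masterlist : List (List (String × List (String × String)))), Dom_storage listofanswers masterlist → Pre_storage listofanswers masterlist → Spec_storage listofanswers masterlist (storage listofanswers masterlist)

-- ===== LEMMAS AND PROOFS =====

-- the flat list of (answer, professor) pairs both programs traverse, and the professors one answer yields
def pvPairs (masterlist : List (List (String × List (String × String)))) : List (String × String) :=
  masterlist.flatMap (fun d => (d.map Prod.snd).flatMap (fun item => item))
def pvProfs (masterlist : List (List (String × List (String × String)))) (answer : String) : List String :=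
  ((pvPairs masterlist).filter (fun p => p.1 == answer)).map Prod.snd

theorem pv_foldl_flatMap {α β γ : Type} (l : List α) (g : α → List β) (f : γ → β → γ) (init : γ) :
    (l.flatMap g).foldl f init = l.foldl (fun acc x => (g x).foldl f acc) init := by
  induction l generalizing init with
  | nil => rfl
  | cons a t ih => simp [List.flatMap_cons, List.foldl_append, ih]

-- A's per-item branch is one counter bump of the professor
theorem pv_stepA_eq_modify (td : PySem.Dict String Int) (p : String) :
    (if td.contains p = false then td.insert p 1 else td.insert p (td.getD p 0 + 1))
      = td.modify p 0 (· + 1) := by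
  by_cases h : td.contains p = true
  · simp [h, PySem.Dict.modify]
  · simp only [Bool.not_eq_true] at h
    have h0 := PySem.Dict.getD_of_not_contains td (0 : Int) h
    simp [h, PySem.Dict.modify, h0]

-- with distinct keys, the pairs of an item matching `answer` are exactly A's single lookup
theorem pv_filter_item (item : List (String × String)) (hnd : (item.map Prod.fst).Nodup) (answer : String) :
    (item.filter (fun p => p.1 == answer)).map Prod.snd
      = (((PySem.Dict.mk item).get? answer).map (fun v => [v])).getD [] := by
  induction item with
  | nil => rfl
  | cons kv rest ih =>
    obtain ⟨k, v⟩ := kv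
    simp only [List.map_cons, List.nodup_cons] at hnd
    rw [List.filter_cons]
    by_cases hk : k = answer
    · subst hk
      have hnone : (PySem.Dict.mk rest).get? k = none := by
        rw [PySem.Dict.get?_eq_none_iff_not_mem_keys]
        simpa [PySem.Dict.keys_mk] using hnd.1
      have : (rest.filter (fun p => p.1 == k)).map Prod.snd = [] := by
        rw [ih hnd.2, hnone]; rfl
      simp [PySem.Dict.get?_mk_cons, this]
    · simp [PySem.Dict.get?_mk_cons, hk, ih hnd.2]

-- the fold over one dictionary's values, itemwise
theorem pv_values_fold (items : List (List (String × String))) (answer : String)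
    (hits : ∀ i ∈ items, (i.map Prod.fst).Nodup) (td : PySem.Dict String Int) :
    items.foldl (fun testdict item =>
        let itemd := PySem.Dict.mk item
        if itemd.contains answer then
          let profname := itemd.getD answer ""
          if testdict.contains profname = false then
            testdict.insert profname 1
          else
            testdict.insert profname (testdict.getD profname 0 + 1)
        else testdict) td
      = items.foldl (fun acc x =>
          ((x.filter (fun p => p.1 == answer)).map Prod.snd).foldl
            (fun td p => td.modify p 0 (· + 1)) acc) td := by
  induction items generalizing td with
  | nil => rfl
  | cons item rest ih =>
    simp only [List.foldl_cons]
    rw [ih (fun i hi => hits i (List.mem_cons_of_mem _ hi))]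
    congr 1
    rw [pv_filter_item item (hits item List.mem_cons_self) answer]
    by_cases hc : (PySem.Dict.mk item).contains answer = true
    · have hsome : ((PySem.Dict.mk item).get? answer).isSome := by
        rw [← PySem.Dict.contains_eq_isSome_get?]; exact hc
      obtain ⟨w, hw⟩ := Option.isSome_iff_exists.mp hsome
      have hval : (PySem.Dict.mk item).getD answer "" = w := by
        rw [PySem.Dict.getD_eq_get?_getD, hw]; rfl
      simp only [hc, if_true, hw, hval, Option.map_some, Option.getD_some,
        List.foldl_cons, List.foldl_nil]
      exact pv_stepA_eq_modify td w
    · have hnone : (PySem.Dict.mk item).get? answer = none := by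
        rw [PySem.Dict.contains_eq_isSome_get?] at hc
        simpa using hc
      simp [hc, hnone]

-- both programs' per-answer effect is the same modify-fold over pvProfs
theorem pv_A_inner (masterlist : List (List (String × List (String × String))))
    (hpre : ∀ d ∈ masterlist, ∀ p ∈ d, (p.2.map Prod.fst).Nodup)
    (answer : String) (td : PySem.Dict String Int) :
    masterlist.foldl (fun testdict dictionary =>
      ((PySem.Dict.mk dictionary).values).foldl (fun testdict item =>
        let itemd := PySem.Dict.mk item
        if itemd.contains answer then
          let profname := itemd.getD answer ""
          if testdict.contains profname = false then
            testdict.insert profname 1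
          else
            testdict.insert profname (testdict.getD profname 0 + 1)
        else testdict) testdict) td
      = (pvProfs masterlist answer).foldl (fun td p => td.modify p 0 (· + 1)) td := by
  induction masterlist generalizing td with
  | nil => rfl
  | cons d rest ih =>
    have hd := fun p hp => hpre d (List.mem_cons_self) p hp
    have hrest : ∀ d' ∈ rest, ∀ p ∈ d', (p.2.map Prod.fst).Nodup :=
      fun d' hd' => hpre d' (List.mem_cons_of_mem _ hd')
    simp only [List.foldl_cons, ih hrest]
    have hprofs : pvProfs (d :: rest) answer
        = pvProfs [d] answer ++ pvProfs rest answer := by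
      simp [pvProfs, pvPairs, List.filter_append]
    rw [hprofs, List.foldl_append]
    congr 1
    have hitems : ∀ item ∈ d.map Prod.snd, (item.map Prod.fst).Nodup := by
      intro item hit
      obtain ⟨p, hp, rfl⟩ := List.mem_map.mp hit
      exact hd p hp
    have hvals : (PySem.Dict.mk d).values = d.map Prod.snd := rfl
    rw [hvals, pv_values_fold (d.map Prod.snd) answer hitems td]
    simp only [pvProfs, pvPairs, List.flatMap_cons, List.flatMap_nil, List.append_nil,
      List.filter_flatMap, List.map_flatMap]
    rw [pv_foldl_flatMap]

-- B's index lists, per answer, exactly pvProfs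
theorem pv_index_getD (masterlist : List (List (String × List (String × String)))) (answer : String) :
    (masterlist.foldl (fun index dictionary =>
      ((PySem.Dict.mk dictionary).values).foldl (fun index item =>
        ((PySem.Dict.mk item).items).foldl (fun index pr =>
          index.modify pr.1 [] (· ++ [pr.2])) index) index)
      (PySem.Dict.empty : PySem.Dict String (List String))).getD answer []
      = pvProfs masterlist answer := by
  have hflat : masterlist.foldl (fun index dictionary =>
      ((PySem.Dict.mk dictionary).values).foldl (fun index item =>
        ((PySem.Dict.mk item).items).foldl (fun index pr =>
          index.modify pr.1 [] (· ++ [pr.2])) index) index)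
      (PySem.Dict.empty : PySem.Dict String (List String))
      = (pvPairs masterlist).foldl (fun index pr =>
          index.modify pr.1 [] (· ++ [pr.2])) PySem.Dict.empty := by
    rw [pvPairs, pv_foldl_flatMap]
    refine List.foldl_ext _ _ _ (fun idx d _ => ?_)
    rw [pv_foldl_flatMap]
    rfl
  rw [hflat, PySem.Dict.getD_foldl_modify_append]
  simp [pvProfs, PySem.Dict.getD_empty]

-- ===== VERDICT (by name: the statement is the Claim_ definition above) =====
theorem storage_spec : Claim_equal_storage := by
  intro listofanswers masterlist _ hpre
  unfold Spec_storage storage storage_alt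
  congr 1
  refine List.foldl_ext _ _ _ (fun td answer _ => ?_)
  rw [pv_A_inner masterlist hpre answer td, pv_index_getD masterlist answer]
  rfl
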